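-- pv_equiv track=rewrite | github.com/benny1020/baekjoon | 프로그래머스/lv2/42586. 기능개발/기능개발.py | solution
-- ===== SOURCE A (Python) =====
-- from collections import deque
--
-- def solution(progresses, speeds):
--     progresses = deque(progresses)
--     speeds = deque(speeds)
--     ans = []
--
--     while(len(progresses) != 0):
--         # 갱신
--         for i in range(len(progresses)):
--             progresses[i] += speeds[i]
--
--         # complete 확인
--         num = 0
--         while(len(progresses) > 0 and progresses[0] >= 100):
--             num+=1
--             progresses.popleft()
--             speeds.popleft()
--
--         if num != 0:
--             ans.append(num)
--         num+=1
--
--     return ans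
-- ===== SOURCE B (Python) =====
-- def solution(progresses, speeds):
--     # One pass: each task needs max(1, ceil((100-p)/s)) days; group by running-max day.
--     ans = []
--     cur = None
--     cnt = 0
--     for p, s in zip(progresses, speeds):
--         d = max(1, -(-(100 - p) // s))
--         if cur is None or d > cur:
--             if cnt:
--                 ans.append(cnt)
--             cur = d
--             cnt = 1
--         else:
--             cnt += 1
--     if cnt:
--         ans.append(cnt)
--     return ans
-- ===== Notes on version B (the rewrite author's own statement) =====
-- stated objective: alternative
-- what changed: Replaces the day-by-day deque simulation with a single pass that computes each task's completion day max(1, ceil((100-p)/s)) in closed form and groups consecutive tasks by the running-maximum day (intended as the standard O(n) solution; a timing run could not measure a ratio because A times out on large random inputs).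
-- outside the precondition, e.g. on solution([100], [0]): A returns [1], B raises ZeroDivisionError
import Mathlib
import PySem

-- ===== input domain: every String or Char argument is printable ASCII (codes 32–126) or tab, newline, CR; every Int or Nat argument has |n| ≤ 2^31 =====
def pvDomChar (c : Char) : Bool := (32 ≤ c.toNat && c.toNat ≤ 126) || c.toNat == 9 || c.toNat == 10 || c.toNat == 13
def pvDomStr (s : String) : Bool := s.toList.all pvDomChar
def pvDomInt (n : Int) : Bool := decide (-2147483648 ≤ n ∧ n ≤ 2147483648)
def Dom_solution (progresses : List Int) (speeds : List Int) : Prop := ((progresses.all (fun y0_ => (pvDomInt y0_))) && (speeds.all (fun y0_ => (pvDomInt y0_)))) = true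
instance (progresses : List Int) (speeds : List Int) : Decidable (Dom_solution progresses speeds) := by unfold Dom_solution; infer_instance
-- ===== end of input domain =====

-- B replaces A's day-by-day deque simulation by a one-pass closed form (completion day
-- max(1, ceil((100-p)/s)) per task, grouped by running-max day); equivalence is about the
-- return value only (A rebinds its parameters to deques, the caller's lists are unchanged).

-- ===== PORT A =====
-- inner while loop: pop from the front of both deques while the head progress is ≥ 100
def pvPop (ps : List Int) (ss : List Int) : Int × List Int × List Int :=
  match ps with
  | [] => (0, [], ss)
  | p :: rest =>
    if 100 ≤ p then
      let r := pvPop rest ss.tail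
      (r.1 + 1, r.2.1, r.2.2)
    else (0, p :: rest, ss)

-- outer while loop; `fuel` is only a totality guard (A's loop may not terminate when some
-- speed is ≤ 0 — outside Pre_ — and under Pre_ the fuel below is proved sufficient).
-- `progresses[i] += speeds[i]` is `List.zipWith (+)`: exact when speeds is at least as long
-- as progresses (Pre_); Python raises IndexError otherwise.
def pvGoA (fuel : Nat) (ps ss ans : List Int) : List Int :=
  match fuel with
  | 0 => ans
  | fuel + 1 =>
    match ps with
    | [] => ans
    | _ :: _ =>
      let ps1 := List.zipWith (fun p s => p + s) ps ss
      let r := pvPop ps1 ss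
      pvGoA fuel r.2.1 r.2.2 (if r.1 ≠ 0 then ans ++ [r.1] else ans)

def pvFuel (ps : List Int) : Nat := (ps.map (fun p => (100 - p).toNat + 1)).sum

def solution (progresses : List Int) (speeds : List Int) : List Int :=
  pvGoA (pvFuel progresses) progresses speeds []

-- ===== PORT B =====
-- d = max(1, -(-(100 - p) // s))
def pvDay (p s : Int) : Int := max 1 (-(PySem.Int.floordiv (-(100 - p)) s))

-- the for-loop of Source B over zip(progresses, speeds), state (cur, cnt, ans)
def pvGoB (zs : List (Int × Int)) (cur : Option Int) (cnt : Int) (ans : List Int) : List Int :=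
  match zs with
  | [] => if cnt ≠ 0 then ans ++ [cnt] else ans
  | (p, s) :: rest =>
    let d := pvDay p s
    match cur with
    | none => pvGoB rest (some d) 1 (if cnt ≠ 0 then ans ++ [cnt] else ans)
    | some c =>
      if d > c then pvGoB rest (some d) 1 (if cnt ≠ 0 then ans ++ [cnt] else ans)
      else pvGoB rest (some c) (cnt + 1) ans

def solution_alt (progresses : List Int) (speeds : List Int) : List Int :=
  pvGoB (progresses.zip speeds) none 0 []

-- ===== PRECONDITION & SPEC =====
-- Pre_ excludes (a) speeds shorter than progresses, where A raises IndexError,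
-- and (b) a non-positive speed paired with a progress, where A's day-by-day loop diverges for
-- every task that never reaches 100 (and B's ceiling division is undefined for speed 0);
-- A returns on a few such inputs only when every stuck task happens to start at ≥ 100-s.
def Pre_solution (progresses : List Int) (speeds : List Int) : Prop :=
  progresses.length ≤ speeds.length ∧ ∀ z ∈ progresses.zip speeds, 0 < z.2

instance (progresses : List Int) (speeds : List Int) : Decidable (Pre_solution progresses speeds) := by
  unfold Pre_solution; infer_instance

def pvWitness_solution : List Int × List Int := ([93, 30, 55], [1, 30, 5])

def Spec_solution (progresses : List Int) (speeds : List Int) (out : List Int) : Prop := out = solution_alt progresses speeds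
instance (progresses : List Int) (speeds : List Int) (out : List Int) : Decidable (Spec_solution progresses speeds out) := by unfold Spec_solution; infer_instance

-- ===== CLAIM (what is proved, stated in full; the proofs are below) =====
def Claim_equal_solution : Prop := ∀ (progresses : List Int) (speeds : List Int), Dom_solution progresses speeds → Pre_solution progresses speeds → Spec_solution progresses speeds (solution progresses speeds)


-- ===== LEMMAS AND PROOFS =====

-- remaining-days value of a task: raw ceiling ceil((100-p)/s) = -((p-100) fdiv s)
def pvRaw (p s : Int) : Int := -(PySem.Int.floordiv (p - 100) s)

def pvRawList (zs : List (Int × Int)) : List Int := zs.map (fun z => pvRaw z.1 z.2)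

-- A's loop replayed on the raw remaining-days values only
def pvSimR (fuel : Nat) (rs ans : List Int) : List Int :=
  match fuel with
  | 0 => ans
  | fuel + 1 =>
    match rs with
    | [] => ans
    | _ :: _ =>
      let rs1 := rs.map (fun r => r - 1)
      let num := (rs1.takeWhile (fun r => decide (r ≤ 0))).length
      pvSimR fuel (rs1.dropWhile (fun r => decide (r ≤ 0))) (if num ≠ 0 then ans ++ [(num : Int)] else ans)

-- B's grouping loop on precomputed day values
def pvGb (ds : List Int) (cur : Option Int) (cnt : Int) (ans : List Int) : List Int :=
  match ds with
  | [] => if cnt ≠ 0 then ans ++ [cnt] else ans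
  | d :: rest =>
    match cur with
    | none => pvGb rest (some d) 1 (if cnt ≠ 0 then ans ++ [cnt] else ans)
    | some c =>
      if d > c then pvGb rest (some d) 1 (if cnt ≠ 0 then ans ++ [cnt] else ans)
      else pvGb rest (some c) (cnt + 1) ans

def pvMeas (rs : List Int) : Nat := (rs.map (fun r => r.toNat + 1)).sum

theorem takeWhile_congr_mem {α : Type} (l : List α) (p q : α → Bool) (h : ∀ a ∈ l, p a = q a) :
    l.takeWhile p = l.takeWhile q := by
  induction l with
  | nil => rfl
  | cons a t ih =>
    simp only [List.takeWhile_cons, h a (by simp)]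
    cases q a with
    | true => simp [ih (fun b hb => h b (by simp [hb]))]
    | false => simp

theorem dropWhile_congr_mem {α : Type} (l : List α) (p q : α → Bool) (h : ∀ a ∈ l, p a = q a) :
    l.dropWhile p = l.dropWhile q := by
  induction l with
  | nil => rfl
  | cons a t ih =>
    simp only [List.dropWhile_cons, h a (by simp)]
    cases q a with
    | true => simp [ih (fun b hb => h b (by simp [hb]))]
    | false => simp

theorem pvRaw_step (p s : Int) (hs : 0 < s) : pvRaw (p + s) s = pvRaw p s - 1 := by
  unfold pvRaw
  rw [PySem.Int.floordiv_eq_ediv_of_pos hs, PySem.Int.floordiv_eq_ediv_of_pos hs]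
  have h : p + s - 100 = (p - 100) + 1 * s := by ring
  rw [h, Int.add_mul_ediv_right _ _ (by omega : s ≠ 0)]
  ring

theorem pvRaw_nonpos_iff (p s : Int) (hs : 0 < s) : pvRaw p s ≤ 0 ↔ 100 ≤ p := by
  unfold pvRaw
  rw [PySem.Int.floordiv_eq_ediv_of_pos hs]
  constructor
  · intro h
    by_contra hc
    have : (p - 100) / s < 0 := Int.ediv_neg_of_neg_of_pos (by omega) hs
    omega
  · intro h
    have : 0 ≤ (p - 100) / s := Int.ediv_nonneg (by omega) (le_of_lt hs)
    omega

theorem pvRaw_le (p s : Int) (hs : 0 < s) : (pvRaw p s).toNat ≤ (100 - p).toNat := by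
  unfold pvRaw
  rw [PySem.Int.floordiv_eq_ediv_of_pos hs]
  by_cases hp : 100 ≤ p
  · have : 0 ≤ (p - 100) / s := Int.ediv_nonneg (by omega) (le_of_lt hs)
    omega
  · have h1 : -(100 - p) ≤ (p - 100) / s := by
      rw [Int.le_ediv_iff_mul_le hs]
      have : (100 - p) ≤ (100 - p) * s := le_mul_of_one_le_right (by omega) hs
      nlinarith
    omega

theorem pvPop_spec (ps ss : List Int) :
    pvPop ps ss = (((ps.takeWhile (fun p => decide (100 ≤ p))).length : Int),
      ps.dropWhile (fun p => decide (100 ≤ p)),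
      ss.drop (ps.takeWhile (fun p => decide (100 ≤ p))).length) := by
  induction ps generalizing ss with
  | nil => rfl
  | cons p rest ih =>
    by_cases hp : 100 ≤ p
    · simp only [pvPop, List.takeWhile_cons, List.dropWhile_cons, hp, decide_true, if_pos hp, ih]
      simp [List.drop_drop, Nat.add_comm]
      omega
    · simp [pvPop, List.takeWhile_cons, List.dropWhile_cons, hp]

theorem zipWith_add_zip (ps ss : List Int) (h : ps.length ≤ ss.length) :
    (List.zipWith (fun p s => p + s) ps ss).zip ss = (ps.zip ss).map (fun z => (z.1 + z.2, z.2)) := by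
  induction ps generalizing ss with
  | nil => simp
  | cons p pr ih =>
    cases ss with
    | nil => simp at h
    | cons s sr =>
      simp only [List.zipWith_cons_cons, List.zip_cons_cons, List.map_cons]
      rw [ih sr (by simpa using h)]

theorem zip_dropWhile (ps ss : List Int) (q : Int → Bool) (h : ps.length ≤ ss.length) :
    (ps.dropWhile q).zip (ss.drop (ps.takeWhile q).length) = (ps.zip ss).dropWhile (fun z => q z.1) := by
  induction ps generalizing ss with
  | nil => simp
  | cons p pr ih =>
    cases ss with
    | nil => simp at h
    | cons s sr =>
      by_cases hq : q p = true
      · simp only [List.dropWhile_cons, List.takeWhile_cons, hq, List.zip_cons_cons, if_true]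
        simpa using ih sr (by simpa using h)
      · simp [List.dropWhile_cons, List.takeWhile_cons, hq]

theorem zip_takeWhile_length (ps ss : List Int) (q : Int → Bool) (h : ps.length ≤ ss.length) :
    ((ps.zip ss).takeWhile (fun z => q z.1)).length = (ps.takeWhile q).length := by
  induction ps generalizing ss with
  | nil => simp
  | cons p pr ih =>
    cases ss with
    | nil => simp at h
    | cons s sr =>
      by_cases hq : q p = true
      · simp only [List.takeWhile_cons, hq, List.zip_cons_cons, if_true, List.length_cons]
        rw [ih sr (by simpa using h)]
      · simp [List.takeWhile_cons, hq]

theorem goA_eq_simR (fuel : Nat) (ps ss ans : List Int)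
    (hlen : ps.length ≤ ss.length) (hpos : ∀ z ∈ ps.zip ss, 0 < z.2) :
    pvGoA fuel ps ss ans = pvSimR fuel (pvRawList (ps.zip ss)) ans := by
  induction fuel generalizing ps ss ans with
  | zero => rfl
  | succ f ih =>
    cases ps with
    | nil => rfl
    | cons p pr =>
      cases ss with
      | nil => simp at hlen
      | cons s sr =>
        have hlen1 : (List.zipWith (fun p s => p + s) (p :: pr) (s :: sr)).length ≤ (s :: sr).length := by
          simp [List.length_zipWith]
        have hlen1e : (List.zipWith (fun p s => p + s) (p :: pr) (s :: sr)).length = (p :: pr).length := by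
          simp only [List.length_zipWith]
          simp only [List.length_cons] at hlen ⊢
          omega
        have hzs1 : (List.zipWith (fun p s => p + s) (p :: pr) (s :: sr)).zip (s :: sr) =
            ((p :: pr).zip (s :: sr)).map (fun z => (z.1 + z.2, z.2)) := zipWith_add_zip _ _ hlen
        have hpos1 : ∀ z ∈ (List.zipWith (fun p s => p + s) (p :: pr) (s :: sr)).zip (s :: sr), 0 < z.2 := by
          rw [hzs1]
          intro z hz
          obtain ⟨w, hw, rfl⟩ := List.mem_map.mp hz
          exact hpos w hw
        have hraw1 : pvRawList ((List.zipWith (fun p s => p + s) (p :: pr) (s :: sr)).zip (s :: sr)) =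
            (pvRawList ((p :: pr).zip (s :: sr))).map (fun r => r - 1) := by
          rw [hzs1]
          unfold pvRawList
          rw [List.map_map, List.map_map]
          apply List.map_congr_left
          intro z hz
          simp only [Function.comp_apply]
          exact pvRaw_step z.1 z.2 (hpos z hz)
        have hpred : ∀ z ∈ (List.zipWith (fun p s => p + s) (p :: pr) (s :: sr)).zip (s :: sr),
            (fun z : Int × Int => decide (100 ≤ z.1)) z = ((fun r : Int => decide (r ≤ 0)) ∘ (fun z : Int × Int => pvRaw z.1 z.2)) z := by
          intro z hz
          simp only [Function.comp_apply, decide_eq_decide]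
          exact (pvRaw_nonpos_iff z.1 z.2 (hpos1 z hz)).symm
        have hnum : ((pvRawList ((List.zipWith (fun p s => p + s) (p :: pr) (s :: sr)).zip (s :: sr))).takeWhile (fun r => decide (r ≤ 0))).length =
            ((List.zipWith (fun p s => p + s) (p :: pr) (s :: sr)).takeWhile (fun x => decide (100 ≤ x))).length := by
          unfold pvRawList
          rw [List.takeWhile_map, List.length_map]
          rw [← takeWhile_congr_mem _ _ _ hpred]
          exact zip_takeWhile_length _ _ (fun x => decide (100 ≤ x)) hlen1
        have hdrop : pvRawList (((List.zipWith (fun p s => p + s) (p :: pr) (s :: sr)).dropWhile (fun x => decide (100 ≤ x))).zip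
              ((s :: sr).drop ((List.zipWith (fun p s => p + s) (p :: pr) (s :: sr)).takeWhile (fun x => decide (100 ≤ x))).length)) =
            (pvRawList ((List.zipWith (fun p s => p + s) (p :: pr) (s :: sr)).zip (s :: sr))).dropWhile (fun r => decide (r ≤ 0)) := by
          rw [zip_dropWhile _ _ _ hlen1]
          unfold pvRawList
          rw [List.dropWhile_map]
          rw [← dropWhile_congr_mem _ _ _ hpred]
        have hunf : pvGoA (f + 1) (p :: pr) (s :: sr) ans =
            pvGoA f (pvPop (List.zipWith (fun p s => p + s) (p :: pr) (s :: sr)) (s :: sr)).2.1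
              (pvPop (List.zipWith (fun p s => p + s) (p :: pr) (s :: sr)) (s :: sr)).2.2
              (if (pvPop (List.zipWith (fun p s => p + s) (p :: pr) (s :: sr)) (s :: sr)).1 ≠ 0
                then ans ++ [(pvPop (List.zipWith (fun p s => p + s) (p :: pr) (s :: sr)) (s :: sr)).1] else ans) := rfl
        rw [hunf, pvPop_spec]
        simp only []
        have hunf2 : pvSimR (f + 1) (pvRawList ((p :: pr).zip (s :: sr))) ans =
            pvSimR f (((pvRawList ((p :: pr).zip (s :: sr))).map (fun r => r - 1)).dropWhile (fun r => decide (r ≤ 0)))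
              (if (((pvRawList ((p :: pr).zip (s :: sr))).map (fun r => r - 1)).takeWhile (fun r => decide (r ≤ 0))).length ≠ 0
                then ans ++ [((((pvRawList ((p :: pr).zip (s :: sr))).map (fun r => r - 1)).takeWhile (fun r => decide (r ≤ 0))).length : Int)] else ans) := rfl
        rw [hunf2, ← hraw1]
        -- recurse
        have hlen2 : ((List.zipWith (fun p s => p + s) (p :: pr) (s :: sr)).dropWhile (fun x => decide (100 ≤ x))).length ≤
            ((s :: sr).drop ((List.zipWith (fun p s => p + s) (p :: pr) (s :: sr)).takeWhile (fun x => decide (100 ≤ x))).length).length := by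
          have h1 := congrArg List.length (List.takeWhile_append_dropWhile (p := fun x => decide (100 ≤ x))
            (l := List.zipWith (fun p s => p + s) (p :: pr) (s :: sr)))
          simp only [List.length_append] at h1
          simp only [List.length_drop]
          simp only [List.length_cons] at hlen hlen1e ⊢
          omega
        have hpos2 : ∀ z ∈ ((List.zipWith (fun p s => p + s) (p :: pr) (s :: sr)).dropWhile (fun x => decide (100 ≤ x))).zip
            ((s :: sr).drop ((List.zipWith (fun p s => p + s) (p :: pr) (s :: sr)).takeWhile (fun x => decide (100 ≤ x))).length), 0 < z.2 := by
          rw [zip_dropWhile _ _ _ hlen1]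
          intro z hz
          exact hpos1 z ((List.dropWhile_sublist _).subset hz)
        rw [ih _ _ _ hlen2 hpos2, hdrop, hnum]
        congr 1
        simp only [ne_eq, Nat.cast_eq_zero]

theorem pvMeas_dropWhile_le (p : Int → Bool) (l : List Int) : pvMeas (l.dropWhile p) ≤ pvMeas l := by
  induction l with
  | nil => simp
  | cons a t ih =>
    by_cases ha : p a = true
    · simp only [List.dropWhile_cons, ha, if_true]
      calc pvMeas (t.dropWhile p) ≤ pvMeas t := ih
        _ ≤ pvMeas (a :: t) := by simp [pvMeas]
    · simp [List.dropWhile_cons, ha]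

theorem pvMeas_map_sub_le (k : Int) (hk : 0 ≤ k) (l : List Int) :
    pvMeas (l.map (fun r => r - k)) ≤ pvMeas l := by
  induction l with
  | nil => simp [pvMeas]
  | cons a t ih =>
    simp only [List.map_cons, pvMeas, List.map, List.sum_cons] at *
    have : (a - k).toNat ≤ a.toNat := by omega
    omega

theorem pvMeas_rawList_le (ps ss : List Int) (hlen : ps.length ≤ ss.length)
    (hpos : ∀ z ∈ ps.zip ss, 0 < z.2) : pvMeas (pvRawList (ps.zip ss)) ≤ pvFuel ps := by
  induction ps generalizing ss with
  | nil => simp [pvRawList, pvMeas, pvFuel]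
  | cons p pr ih =>
    cases ss with
    | nil => simp at hlen
    | cons s sr =>
      have hs : 0 < s := hpos (p, s) (by simp)
      have h1 := pvRaw_le p s hs
      have h2 := ih sr (by simpa using hlen) (fun z hz => hpos z (by simp [hz]))
      simp only [List.zip_cons_cons, pvRawList, List.map_cons, pvMeas, List.sum_cons, pvFuel] at *
      omega

theorem map_sub_sub (a b : Int) (l : List Int) :
    (l.map (fun r => r - a)).map (fun r => r - b) = l.map (fun r => r - (a + b)) := by
  simp only [List.map_map]
  apply List.map_congr_left
  intro x _
  simp only [Function.comp_apply]
  omega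

theorem simR_group (n : Nat) (f : Nat) (r0 : Int) (rs ans : List Int)
    (h : max 1 r0 = (n : Int) + 1) :
    pvSimR (f + (n + 1)) (r0 :: rs) ans =
      pvSimR f ((rs.dropWhile (fun r => decide (r ≤ (n : Int) + 1))).map (fun r => r - ((n : Int) + 1)))
        (ans ++ [1 + ((rs.takeWhile (fun r => decide (r ≤ (n : Int) + 1))).length : Int)]) := by
  induction n generalizing r0 rs ans with
  | zero =>
    have hr0 : r0 ≤ 1 := by have := le_max_right (1 : Int) r0; omega
    simp only [Nat.zero_add, Nat.cast_zero]
    simp only [pvSimR, List.map_cons]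
    have hd : decide (r0 - 1 ≤ (0 : Int)) = true := by simp; omega
    rw [List.takeWhile_cons, List.dropWhile_cons, hd]
    simp only [if_true, List.length_cons]
    rw [List.takeWhile_map, List.dropWhile_map]
    have hp : ((fun r : Int => decide (r ≤ 0)) ∘ (fun r : Int => r - 1)) = (fun r : Int => decide (r ≤ (0 : Int) + 1)) := by
      funext r; simp only [Function.comp_apply, decide_eq_decide]; omega
    rw [hp]
    have hnum : ((rs.takeWhile (fun r : Int => decide (r ≤ (0:Int) + 1))).map (fun r => r - 1)).length + 1 ≠ 0 := by omega
    simp only [if_pos hnum, List.length_map]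
    norm_num
    ring_nf
  | succ m ihm =>
    have hr0 : r0 = (m : Int) + 2 := by
      have h2 := le_max_left (1 : Int) r0
      have h3 := le_max_right (1 : Int) r0
      push_cast at h
      omega
    have hstep : f + (m + 1 + 1) = (f + (m + 1)) + 1 := by omega
    rw [hstep]
    have hunf : pvSimR ((f + (m + 1)) + 1) (r0 :: rs) ans =
        pvSimR (f + (m + 1))
          (((r0 :: rs).map (fun r => r - 1)).dropWhile (fun r => decide (r ≤ 0)))
          (if (((r0 :: rs).map (fun r => r - 1)).takeWhile (fun r => decide (r ≤ 0))).length ≠ 0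
            then ans ++ [((((r0 :: rs).map (fun r => r - 1)).takeWhile (fun r => decide (r ≤ 0))).length : Int)] else ans) := rfl
    rw [hunf]
    have hd : decide (r0 - 1 ≤ (0 : Int)) = false := by simp; omega
    simp only [List.map_cons, List.takeWhile_cons, List.dropWhile_cons, hd, Bool.false_eq_true,
      if_false, List.length_nil]
    norm_num
    rw [ihm (r0 - 1) (rs.map (fun r => r - 1)) ans (by rw [hr0]; push_cast; omega)]
    rw [List.takeWhile_map, List.dropWhile_map]
    have hp : ((fun r : Int => decide (r ≤ (m : Int) + 1)) ∘ (fun r : Int => r - 1)) = (fun r : Int => decide (r ≤ ((m : Int) + 1) + 1)) := by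
      funext r; simp only [Function.comp_apply, decide_eq_decide]; omega
    rw [hp, map_sub_sub]
    simp only [List.length_map]
    push_cast
    congr 1
    apply List.map_congr_left
    intro x _
    ring

theorem gb_absorb (ds : List Int) (c cnt : Int) (ans : List Int) :
    pvGb ds (some c) cnt ans =
      pvGb (ds.dropWhile (fun d => decide (d ≤ c))) (some c)
        (cnt + ((ds.takeWhile (fun d => decide (d ≤ c))).length : Int)) ans := by
  induction ds generalizing cnt with
  | nil => simp [pvGb]
  | cons d rest ih =>
    by_cases hd : d ≤ c
    · have hdc : ¬ d > c := by omega
      simp only [pvGb, List.takeWhile_cons, List.dropWhile_cons, hd, decide_true, if_neg hdc]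
      rw [ih (cnt + 1)]
      congr 1
      simp only [if_true, List.length_cons]
      push_cast
      ring
    · have hdc : d > c := by omega
      simp [pvGb, List.takeWhile_cons, List.dropWhile_cons, hd, hdc]

theorem gb_shift (rs : List Int) (k : Int) (hk : 0 ≤ k) : ∀ (c cnt : Int) (ans : List Int), 1 + k ≤ c →
    pvGb ((rs.map (fun r => r - k)).map (fun r => max 1 r)) (some (c - k)) cnt ans =
      pvGb (rs.map (fun r => max 1 r)) (some c) cnt ans := by
  induction rs with
  | nil => intro c cnt ans h; simp [pvGb]
  | cons r rest ih =>
    intro c cnt ans h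
    have hmax : max 1 (r - k) > c - k ↔ max 1 r > c := by
      rw [gt_iff_lt, gt_iff_lt, lt_max_iff, lt_max_iff]; omega
    simp only [List.map_cons, pvGb]
    by_cases hgt : max 1 r > c
    · have hgt' : max 1 (r - k) > c - k := hmax.mpr hgt
      have hr : c < r := by rw [gt_iff_lt, lt_max_iff] at hgt; omega
      simp only [if_pos hgt, if_pos hgt']
      have h1 : max 1 (r - k) = r - k := max_eq_right (by omega)
      have h2 : max 1 r = r := max_eq_right (by omega)
      rw [h1, h2]
      exact ih r 1 _ (by omega)
    · have hgt' : ¬ max 1 (r - k) > c - k := fun hx => hgt (hmax.mp hx)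
      simp only [if_neg hgt, if_neg hgt']
      exact ih c (cnt + 1) ans h

theorem dropWhile_head_false {α : Type} (p : α → Bool) (l : List α) (a : α) (t : List α)
    (h : l.dropWhile p = a :: t) : p a = false := by
  induction l with
  | nil => simp at h
  | cons b t ih =>
    by_cases hb : p b = true
    · rw [List.dropWhile_cons, if_pos hb] at h
      exact ih h
    · rw [List.dropWhile_cons, if_neg hb] at h
      cases h
      simpa using hb

theorem simR_eq_gb (L : Nat) (rs : List Int) (fuel : Nat) (ans : List Int)
    (hL : rs.length ≤ L) (hf : pvMeas rs ≤ fuel) :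
    pvSimR fuel rs ans = pvGb (rs.map (fun r => max 1 r)) none 0 ans := by
  induction L generalizing rs fuel ans with
  | zero =>
    have : rs = [] := List.eq_nil_of_length_eq_zero (by omega)
    subst this
    cases fuel <;> simp [pvSimR, pvGb]
  | succ L ihL =>
    match rs with
    | [] => cases fuel <;> simp [pvSimR, pvGb]
    | r0 :: rs' =>
      have hm1 : (1 : Int) ≤ max 1 r0 := le_max_left _ _
      have hm2 : r0 ≤ max 1 r0 := le_max_right _ _
      set n : Nat := (max 1 r0 - 1).toNat with hn_def
      have hn : max 1 r0 = (n : Int) + 1 := by omega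
      have hmeas : pvMeas (r0 :: rs') = r0.toNat + 1 + pvMeas rs' := by
        simp [pvMeas]
      have hfn : n + 1 ≤ fuel := by
        have : (n : Int) + 1 ≤ r0.toNat + 1 := by omega
        omega
      obtain ⟨f, hfeq⟩ : ∃ f, fuel = f + (n + 1) := ⟨fuel - (n + 1), by omega⟩
      subst hfeq
      rw [simR_group n f r0 rs' ans hn]
      have hq : ((fun d : Int => decide (d ≤ (n : Int) + 1)) ∘ (fun r : Int => max 1 r)) = (fun r : Int => decide (r ≤ (n : Int) + 1)) := by
        funext r
        simp only [Function.comp_apply, decide_eq_decide, max_le_iff]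
        omega
      -- RHS: unfold one pvGb step and absorb the first group
      have hrhs : pvGb ((r0 :: rs').map (fun r => max 1 r)) none 0 ans =
          pvGb ((rs'.dropWhile (fun r => decide (r ≤ (n : Int) + 1))).map (fun r => max 1 r)) (some ((n : Int) + 1))
            (1 + ((rs'.takeWhile (fun r => decide (r ≤ (n : Int) + 1))).length : Int)) ans := by
        simp only [List.map_cons, pvGb, ne_eq, not_true_eq_false, if_false]
        rw [hn, gb_absorb]
        rw [List.takeWhile_map, List.dropWhile_map, hq]
        simp [List.length_map]
      rw [hrhs]
      -- LHS: induction hypothesis on the shifted remainder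
      have hlen' : ((rs'.dropWhile (fun r => decide (r ≤ (n : Int) + 1))).map (fun r => r - ((n : Int) + 1))).length ≤ L := by
        have h1 := List.length_dropWhile_le (fun r : Int => decide (r ≤ (n : Int) + 1)) rs'
        simp only [List.length_map]
        simp only [List.length_cons] at hL
        omega
      have hf' : pvMeas ((rs'.dropWhile (fun r => decide (r ≤ (n : Int) + 1))).map (fun r => r - ((n : Int) + 1))) ≤ f := by
        have h1 := pvMeas_map_sub_le ((n : Int) + 1) (by omega) (rs'.dropWhile (fun r => decide (r ≤ (n : Int) + 1)))
        have h2 := pvMeas_dropWhile_le (fun r : Int => decide (r ≤ (n : Int) + 1)) rs'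
        have : (n : Int) + 1 ≤ r0.toNat + 1 := by omega
        omega
      rw [ihL _ f _ hlen' hf']
      -- compare the two pvGb runs
      cases hD : rs'.dropWhile (fun r => decide (r ≤ (n : Int) + 1)) with
      | nil =>
        simp only [List.map_nil, pvGb]
        have : 1 + ((rs'.takeWhile (fun r => decide (r ≤ (n : Int) + 1))).length : Int) ≠ 0 := by positivity
        simp [this]
      | cons q0 D' =>
        have hq0 : (fun r : Int => decide (r ≤ (n : Int) + 1)) q0 = false := dropWhile_head_false (fun r : Int => decide (r ≤ (n : Int) + 1)) rs' q0 D' hD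
        have hq0' : (n : Int) + 1 < q0 := by simpa using hq0
        simp only [List.map_cons, pvGb]
        have hgt : max 1 q0 > (n : Int) + 1 := lt_max_of_lt_right hq0'
        have hmax1 : max 1 (q0 - ((n : Int) + 1)) = q0 - ((n : Int) + 1) := max_eq_right (by omega)
        have hmax2 : max 1 q0 = q0 := max_eq_right (by omega)
        have hcnt : (1 + ((rs'.takeWhile (fun r => decide (r ≤ (n : Int) + 1))).length : Int)) ≠ 0 := by positivity
        simp only [if_pos hgt, hmax1, hmax2, ne_eq, not_true_eq_false, if_false, hcnt, if_true, if_pos hq0']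
        have := gb_shift D' ((n : Int) + 1) (by omega) q0 1
          (ans ++ [1 + ((rs'.takeWhile (fun r => decide (r ≤ (n : Int) + 1))).length : Int)]) (by omega)
        rw [show q0 - ((n : Int) + 1) = q0 - ((n : Int) + 1) from rfl] at this
        simpa using this

theorem goB_eq_gb (zs : List (Int × Int)) (cur : Option Int) (cnt : Int) (ans : List Int) :
    pvGoB zs cur cnt ans = pvGb (zs.map (fun z => pvDay z.1 z.2)) cur cnt ans := by
  induction zs generalizing cur cnt ans with
  | nil => cases cur <;> rfl
  | cons z rest ih =>
    obtain ⟨p, s⟩ := z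
    cases cur with
    | none => simp only [pvGoB, pvGb, List.map_cons]; exact ih _ _ _
    | some c =>
      simp only [pvGoB, pvGb, List.map_cons]
      by_cases hd : pvDay p s > c
      · simp only [if_pos hd]; exact ih _ _ _
      · simp only [if_neg hd]; exact ih _ _ _

-- ===== VERDICT (by name: the statement is the Claim_ definition above) =====
theorem solution_spec : Claim_equal_solution := by
  intro ps ss _ hpre
  obtain ⟨hlen, hpos⟩ := hpre
  unfold Spec_solution solution solution_alt
  rw [goA_eq_simR (pvFuel ps) ps ss [] hlen hpos]
  rw [simR_eq_gb (pvRawList (ps.zip ss)).length _ (pvFuel ps) [] le_rfl (pvMeas_rawList_le ps ss hlen hpos)]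
  rw [goB_eq_gb]
  congr 1
  unfold pvRawList
  rw [List.map_map]
  apply List.map_congr_left
  intro z _
  simp only [Function.comp_apply, pvDay, pvRaw]
  rw [show -(100 - z.1) = z.1 - 100 from by ring]
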